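-- pv_equiv track=rewrite | github.com/divyadadarya/algorithms | Dynamic Programming/longestDecreasingSubsequence.py | getLds
-- ===== SOURCE A (Python) =====
-- def getLds(nums, i, prev):
-- 	if i == len(nums):
-- 		return 0
--
-- 	incl = 0
--
-- 	if nums[i] < prev:
-- 		incl = 1 + getLds(nums, i+1, nums[i])
--
-- 	excl = getLds(nums, i+1, prev)
--
-- 	return max(excl, incl)
-- ===== SOURCE B (Python) =====
-- def getLds(nums, i, prev):
--     seq = [nums[j] for j in range(i, len(nums))]
--     # starts[k] = (value, length of the longest strictly decreasing subsequence
--     # of the remaining elements that starts with that value)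
--     starts = []
--     for x in reversed(seq):
--         cur = 0
--         for y, l in starts:
--             if y < x and l > cur:
--                 cur = l
--         starts = [(x, 1 + cur)] + starts
--     best = 0
--     for y, l in starts:
--         if y < prev and l > best:
--             best = l
--     return best
-- ===== Notes on version B (the rewrite author's own statement) =====
-- stated objective: alternative
-- what changed: Replaced the include/exclude recursion over (index, prev) by an iterative dynamic program that scans the sequence once from the right, tabulating for each position the longest strictly decreasing subsequence starting there, then takes the best start below prev; intended as asymptotically faster (a timing run saw A time out at large sizes but could not confirm the speed-up consistently, so no speed is claimed).
import Mathlib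
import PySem

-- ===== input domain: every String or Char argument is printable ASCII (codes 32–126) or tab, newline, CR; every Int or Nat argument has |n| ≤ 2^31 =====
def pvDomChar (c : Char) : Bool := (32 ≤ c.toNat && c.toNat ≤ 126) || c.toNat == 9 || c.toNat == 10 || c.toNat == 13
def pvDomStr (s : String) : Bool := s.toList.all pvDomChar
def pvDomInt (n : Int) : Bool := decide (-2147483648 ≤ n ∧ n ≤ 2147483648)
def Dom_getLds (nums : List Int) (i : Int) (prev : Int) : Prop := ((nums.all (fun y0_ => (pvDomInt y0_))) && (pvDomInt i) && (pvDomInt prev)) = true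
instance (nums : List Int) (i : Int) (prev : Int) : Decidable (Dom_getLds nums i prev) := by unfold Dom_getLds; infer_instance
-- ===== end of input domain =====

-- B replaces A's include/exclude recursion by an iterative right-to-left dynamic
-- program over a table of starts; A raises IndexError when i > len(nums) or
-- i < -len(nums), hence Pre_.


-- ===== PORT A =====
-- literal port of A; nums[i] is pyGet? (none = IndexError, returns 0 there, excluded by Pre_)
def getLds (nums : List Int) (i : Int) (prev : Int) : Int :=
  if i = (nums.length : Int) then 0
  else
    match h : PySem.List.pyGet? nums i with
    | none => 0   -- Python raises IndexError here; outside Pre_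
    | some v =>
      let incl : Int := if v < prev then 1 + getLds nums (i + 1) v else 0
      let excl : Int := getLds nums (i + 1) prev
      max excl incl
termination_by ((nums.length : Int) - i).toNat
decreasing_by
  all_goals
    have hr : PySem.Raise.InRange nums.length i := by
      by_contra hc
      rw [(PySem.List.pyGet?_eq_none_iff nums i).mpr hc] at h
      simp at h
    unfold PySem.Raise.InRange at hr
    omega

-- ===== PORT B =====
-- seq = [nums[j] for j in range(i, len(nums))]
def pvSeq (nums : List Int) (i : Int) : List Int :=
  (PySem.List.pyRange i (nums.length : Int) 1).map
    (fun j => (PySem.List.pyGet? nums j).getD 0)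

-- inner loop: cur = 0; for y, l in starts: if y < b and l > cur: cur = l
def pvBestBelow (b : Int) (init : Int) (starts : List (Int × Int)) : Int :=
  starts.foldl (fun cur yl => if yl.1 < b ∧ yl.2 > cur then yl.2 else cur) init

-- for x in reversed(seq): … starts = [(x, 1+cur)] + starts
def pvStarts (seq : List Int) : List (Int × Int) :=
  seq.foldr (fun x acc => (x, 1 + pvBestBelow x 0 acc) :: acc) []

def getLds_alt (nums : List Int) (i : Int) (prev : Int) : Int :=
  pvBestBelow prev 0 (pvStarts (pvSeq nums i))

-- ===== PRECONDITION & SPEC =====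
-- Pre_ excludes exactly the inputs where Python A raises IndexError: nums[i] with i outside [-len, len).
-- (i = len returns 0 without indexing, so it stays inside.)
def Pre_getLds (nums : List Int) (i : Int) (prev : Int) : Prop :=
  -(nums.length : Int) ≤ i ∧ i ≤ (nums.length : Int)
instance (nums : List Int) (i : Int) (prev : Int) : Decidable (Pre_getLds nums i prev) := by unfold Pre_getLds; infer_instance

def pvWitness_getLds : List Int × Int × Int := ([5, 3, 4, 2, 1], 0, 10)

def Spec_getLds (nums : List Int) (i : Int) (prev : Int) (out : Int) : Prop := out = getLds_alt nums i prev
instance (nums : List Int) (i : Int) (prev : Int) (out : Int) : Decidable (Spec_getLds nums i prev out) := by unfold Spec_getLds; infer_instance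

-- ===== CLAIM (what is proved, stated in full; the proofs are below) =====
def Claim_equal_getLds : Prop := ∀ (nums : List Int) (i : Int) (prev : Int), Dom_getLds nums i prev → Pre_getLds nums i prev → Spec_getLds nums i prev (getLds nums i prev)

-- ===== LEMMAS AND PROOFS =====

-- A at list level: the same include/exclude recursion on the remaining elements.
def pvFA : List Int → Int → Int
  | [], _ => 0
  | x :: s, p => max (pvFA s p) (if x < p then 1 + pvFA s x else 0)

-- clean max-fold: Q p acc = max {l | (y,l) ∈ acc, y < p} ∪ {0}
def pvQ (p : Int) : List (Int × Int) → Int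
  | [] => 0
  | (y, l) :: acc => if y < p then max l (pvQ p acc) else pvQ p acc

lemma pvQ_nonneg (p : Int) (s : List (Int × Int)) : 0 ≤ pvQ p s := by
  induction s with
  | nil => simp [pvQ]
  | cons yl s ih => obtain ⟨y, l⟩ := yl; simp only [pvQ]; split_ifs <;> omega

lemma pvBestBelow_eq_max (p : Int) (b : Int) (hb : 0 ≤ b) (s : List (Int × Int)) :
    pvBestBelow p b s = max b (pvQ p s) := by
  induction s generalizing b with
  | nil =>
    simp only [pvBestBelow, List.foldl_nil, pvQ]
    omega
  | cons yl s ih =>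
    obtain ⟨y, l⟩ := yl
    simp only [pvBestBelow, List.foldl_cons] at *
    rw [ih _ (by split_ifs <;> omega)]
    have := pvQ_nonneg p s
    simp only [pvQ]
    split_ifs <;> omega

-- invariant of the right-to-left DP: querying the table answers A's recursion
lemma pvFA_eq_Q (s : List Int) (p : Int) : pvFA s p = pvQ p (pvStarts s) := by
  induction s generalizing p with
  | nil => simp [pvFA, pvStarts, pvQ]
  | cons x s ih =>
    have hx := ih x
    have hp := ih p
    simp only [pvFA, pvStarts, List.foldr_cons] at *
    rw [pvBestBelow_eq_max x 0 le_rfl]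
    simp only [pvQ]
    rw [← hx, ← hp]
    have h0 : (0:Int) ≤ pvFA s p := by rw [hp]; exact pvQ_nonneg p (pvStarts s)
    have h0x : (0:Int) ≤ pvFA s x := by rw [hx]; exact pvQ_nonneg x (pvStarts s)
    split_ifs <;> omega

-- bridge: A's indexed recursion equals the list-level recursion on pvSeq
lemma pvSeq_nil (nums : List Int) : pvSeq nums (nums.length : Int) = [] := by
  simp [pvSeq, PySem.List.pyRange_one_eq_nil]

lemma pvSeq_cons (nums : List Int) (i : Int) (h : i < (nums.length : Int)) :
    pvSeq nums i = (PySem.List.pyGet? nums i).getD 0 :: pvSeq nums (i + 1) := by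
  simp [pvSeq, PySem.List.pyRange_one_cons h]

lemma getLds_eq_FA (nums : List Int) (k : Nat) :
    ∀ i prev, i = (nums.length : Int) - k → -(nums.length : Int) ≤ i →
      getLds nums i prev = pvFA (pvSeq nums i) prev := by
  induction k with
  | zero =>
    intro i prev hi _
    subst hi
    simp only [Nat.cast_zero, sub_zero]
    rw [getLds, pvSeq_nil]
    simp [pvFA]
  | succ k ih =>
    intro i prev hi hlo
    have hlt : i < (nums.length : Int) := by omega
    have hr : PySem.Raise.InRange nums.length i := by
      unfold PySem.Raise.InRange; omega
    obtain ⟨v, hv⟩ : ∃ v, PySem.List.pyGet? nums i = some v := by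
      cases hg : PySem.List.pyGet? nums i with
      | none => exact absurd hr ((PySem.List.pyGet?_eq_none_iff nums i).mp hg)
      | some v => exact ⟨v, rfl⟩
    have h1 : i + 1 = (nums.length : Int) - k := by push_cast at hi ⊢; omega
    rw [getLds, pvSeq_cons nums i hlt, hv]
    simp only [Option.getD_some, pvFA]
    rw [if_neg (by omega : ¬ i = (nums.length : Int))]
    rw [ih (i+1) prev h1 (by omega), ih (i+1) v h1 (by omega)]

theorem getLds_spec : Claim_equal_getLds := by
  intro nums i prev _ hpre
  obtain ⟨hlo, hhi⟩ := hpre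
  unfold Spec_getLds getLds_alt
  rw [getLds_eq_FA nums ((nums.length : Int) - i).toNat i prev (by omega) hlo,
      pvFA_eq_Q, pvBestBelow_eq_max prev 0 le_rfl]
  have := pvQ_nonneg prev (pvStarts (pvSeq nums i))
  omega
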